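-- pv_equiv track=rewrite | github.com/danielaromiuca/lambdas | app/count_tags.py | tags_count
-- ===== SOURCE A (Python) =====
-- def tags_count(text: str, economic_tags: list, uncertainty_tags: list) -> list:
--
--     economic_tokens_count = 0
--     uncertainty_tokens_count = 0
--
--     tokens_ls = text.split(" ")
--
--     tokens_count = len(tokens_ls)
--
--     for token in tokens_ls:
--
--         if token in economic_tags:
--             economic_tokens_count += 1
--         if token in uncertainty_tags:
--             uncertainty_tokens_count += 1
--     return tokens_count, economic_tokens_count, uncertainty_tokens_count
-- ===== SOURCE B (Python) =====
-- def tags_count(text: str, economic_tags: list, uncertainty_tags: list) -> list: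
--     tokens_ls = text.split(" ")
--     counts = {}
--     for t in tokens_ls:
--         counts[t] = counts.get(t, 0) + 1
--     economic_tokens_count = sum(c for t, c in counts.items() if t in economic_tags)
--     uncertainty_tokens_count = sum(c for t, c in counts.items() if t in uncertainty_tags)
--     return len(tokens_ls), economic_tokens_count, uncertainty_tokens_count
-- ===== Notes on version B (the rewrite author's own statement) =====
-- stated objective: alternative
-- what changed: B replaces A's single pass that tests every token against both tag lists by a two-phase decomposition: it first builds a frequency dict over the tokens, then computes each tag count by summing multiplicities over the distinct tokens only.
import Mathlib
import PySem

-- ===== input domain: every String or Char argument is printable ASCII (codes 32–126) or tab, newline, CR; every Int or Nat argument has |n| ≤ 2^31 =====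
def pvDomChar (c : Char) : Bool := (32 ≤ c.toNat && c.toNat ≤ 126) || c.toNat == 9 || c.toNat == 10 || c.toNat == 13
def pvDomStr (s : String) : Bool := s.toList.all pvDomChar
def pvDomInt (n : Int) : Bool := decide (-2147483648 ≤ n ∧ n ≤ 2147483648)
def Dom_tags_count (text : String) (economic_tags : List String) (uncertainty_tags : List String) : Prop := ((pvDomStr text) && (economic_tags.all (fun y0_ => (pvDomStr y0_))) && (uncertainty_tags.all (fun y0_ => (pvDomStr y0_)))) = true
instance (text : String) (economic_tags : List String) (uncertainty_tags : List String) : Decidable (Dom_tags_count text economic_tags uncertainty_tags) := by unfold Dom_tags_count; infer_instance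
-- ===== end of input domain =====

-- B replaces A's per-token tag-membership loop by a two-phase frequency-table pass
-- (count each distinct token once, then sum multiplicities over the distinct tokens
-- that are tags); objective: alternative decomposition, same exact result.

-- ===== PORT A =====
-- literal port of A: one loop over the tokens with two running counters
def tags_count (text : String) (economic_tags : List String) (uncertainty_tags : List String) : List Int :=
  let tokens_ls := (PySem.Str.split? text " ").getD []   -- sep " " is nonempty, split? is some
  let tokens_count : Int := tokens_ls.length
  let s := tokens_ls.foldl (fun (s : Int × Int) token =>
    (if economic_tags.contains token then s.1 + 1 else s.1,
     if uncertainty_tags.contains token then s.2 + 1 else s.2)) (0, 0)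
  [tokens_count, s.1, s.2]

-- ===== PORT B =====
-- literal port of Source B: build the frequency dict, then sum counts over its distinct keys
def tags_count_alt (text : String) (economic_tags : List String) (uncertainty_tags : List String) : List Int :=
  let tokens_ls := (PySem.Str.split? text " ").getD []   -- sep " " is nonempty, split? is some
  let counts : PySem.Dict String Int :=
    tokens_ls.foldl (fun d t => d.insert t (d.getD t 0 + 1)) PySem.Dict.empty
  let economic_tokens_count :=
    ((counts.items.filter (fun p => economic_tags.contains p.1)).map (fun p => p.2)).sum
  let uncertainty_tokens_count :=
    ((counts.items.filter (fun p => uncertainty_tags.contains p.1)).map (fun p => p.2)).sum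
  [(tokens_ls.length : Int), economic_tokens_count, uncertainty_tokens_count]

-- ===== PRECONDITION & SPEC =====
def Spec_tags_count (text : String) (economic_tags : List String) (uncertainty_tags : List String) (out : List Int) : Prop := out = tags_count_alt text economic_tags uncertainty_tags
instance (text : String) (economic_tags : List String) (uncertainty_tags : List String) (out : List Int) : Decidable (Spec_tags_count text economic_tags uncertainty_tags out) := by unfold Spec_tags_count; infer_instance

-- ===== CLAIM (what is proved, stated in full; the proofs are below) =====
def Claim_equal_tags_count : Prop := ∀ (text : String) (economic_tags : List String) (uncertainty_tags : List String), Dom_tags_count text economic_tags uncertainty_tags → Spec_tags_count text economic_tags uncertainty_tags (tags_count text economic_tags uncertainty_tags)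

-- ===== LEMMAS AND PROOFS =====

-- indicators of a value absent from the list sum to zero
lemma sum_zero_of_not_mem (t : List String) (p : String → Bool) (a : String)
    (h : a ∉ t) :
    ((t.filter p).map (fun k => if k = a then (1:Int) else 0)).sum = 0 := by
  have : ∀ k ∈ t.filter p, (if k = a then (1:Int) else 0) = (fun _ => (0:Int)) k := by
    intro k hk
    have : k ≠ a := fun e => h (e ▸ List.mem_of_mem_filter hk)
    simp [this]
  rw [List.map_congr_left this]
  simp

-- summing 'k = a' indicators over a duplicate-free list containing a picks out p a
lemma sum_indicator_filter (s : List String) (p : String → Bool) (a : String)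
    (hnd : s.Nodup) (ha : a ∈ s) :
    ((s.filter p).map (fun k => if k = a then (1:Int) else 0)).sum
      = if p a then 1 else 0 := by
  induction s with
  | nil => cases ha
  | cons b t ih =>
    rw [List.nodup_cons] at hnd
    rcases List.mem_cons.1 ha with h | h
    · subst h
      have hz := sum_zero_of_not_mem t p a hnd.1
      by_cases hp : p a <;> simp [hp, hz]
    · have hba : b ≠ a := fun e => hnd.1 (e ▸ h)
      by_cases hpb : p b <;> simp [hpb, hba, ih hnd.2 h]

-- multiplicity in (c :: u) splits into the head indicator plus multiplicity in u
lemma count_split (k c : String) (u : List String) :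
    (((c :: u).count k : Nat) : Int) = (if k = c then (1:Int) else 0) + (u.count k : Int) := by
  by_cases h : k = c
  · subst h
    rw [List.count_cons_self, if_pos rfl]
    push_cast
    omega
  · have h' : ¬c = k := fun e => h e.symm
    simp [h, h']

-- summing t's multiplicities over the keys of any duplicate-free superset filtered by p is countP p t
lemma sum_counts_superset (p : String → Bool) (t : List String) :
    ∀ (s : List String), s.Nodup → (∀ x ∈ t, x ∈ s) →
    ((s.filter p).map (fun k => (t.count k : Int))).sum = (t.countP p : Int) := by
  induction t with
  | nil => intro s _ _; simp
  | cons c u ih =>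
    intro s hsnd hss
    have hc : c ∈ s := hss c List.mem_cons_self
    calc ((s.filter p).map (fun k => ((c :: u).count k : Int))).sum
        = ((s.filter p).map (fun k => (if k = c then (1:Int) else 0) + (u.count k : Int))).sum := by
          exact congrArg List.sum (List.map_congr_left (fun k _ => count_split k c u))
      _ = ((s.filter p).map (fun k => if k = c then (1:Int) else 0)).sum
            + ((s.filter p).map (fun k => (u.count k : Int))).sum := by
          rw [← PySem.List.sum_map_add_int]
      _ = (if p c then 1 else 0) + (u.countP p : Int) := by
          rw [sum_indicator_filter s p c hsnd hc,
              ih s hsnd (fun x hx => hss x (List.mem_cons_of_mem _ hx))]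
      _ = ((c :: u).countP p : Int) := by
          by_cases hpc : p c <;> simp [hpc] <;> omega

-- B's dict-based tag count equals countP over the token list, for one tag list
lemma alt_count_eq (xs : List String) (tags : List String) :
    (((xs.foldl (fun d t => d.insert t (d.getD t 0 + 1)) PySem.Dict.empty).items.filter
        (fun p => tags.contains p.1)).map (fun p => p.2)).sum
      = (xs.countP (fun t => tags.contains t) : Int) := by
  rw [PySem.Dict.foldl_insert_getD_add_one_eq_counter, PySem.Dict.items_counter]
  rw [List.filter_map, List.map_map]
  have h1 : (List.filter ((fun p : String × Int => tags.contains p.1) ∘ fun k => (k, (xs.count k : Int)))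
            (PySem.Set.ofList xs)) = (PySem.Set.ofList xs).filter (fun k => tags.contains k) := by
    apply List.filter_congr; intro k _; rfl
  rw [h1]
  have h2 : ((fun p : String × Int => p.2) ∘ fun k => (k, (xs.count k : Int)))
          = fun k => (xs.count k : Int) := rfl
  rw [h2]
  exact sum_counts_superset (fun k => tags.contains k) xs (PySem.Set.ofList xs)
    (PySem.Set.nodup_ofList xs) (fun x hx => (PySem.Set.mem_ofList _ _).2 hx)

-- ===== VERDICT (by name: the statement is the Claim_ definition above) =====
theorem tags_count_spec : Claim_equal_tags_count := by
  intro text econ unc _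
  unfold Spec_tags_count
  simp only [tags_count, tags_count_alt]
  rw [PySem.List.foldl_prod_mk
        (f := fun acc token => if econ.contains token then acc + 1 else acc)
        (g := fun acc token => if unc.contains token then acc + 1 else acc)]
  rw [PySem.List.foldl_if_add_one, PySem.List.foldl_if_add_one]
  rw [alt_count_eq, alt_count_eq]
  simp
  refine ⟨List.countP_congr fun x _ => ?_, List.countP_congr fun x _ => ?_⟩ <;> simp
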